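-- pv_equiv track=rewrite | github.com/yasenstar/DoingMathWithPython | ch03/03-08_5_grouped-frequency-table.py | classify
-- ===== SOURCE A (Python) =====
-- def classify(numbers, classes):
--     count = [0]*len(classes)
--     for n in numbers:
--         for index, c in enumerate(classes):
--             if n >= c[0] and n < c[1]:
--                 count[index] = count[index] + 1
--                 break
--     return count
-- ===== SOURCE B (Python) =====
-- def classify(numbers, classes):
--     # per-class pass over a shrinking pool of still-unclassified numbers
--     remaining = numbers
--     counts = []
--     for c in classes:
--         lo, hi = c[0], c[1]
--         matched = [n for n in remaining if lo <= n < hi]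
--         counts.append(len(matched))
--         remaining = [n for n in remaining if not (lo <= n < hi)]
--     return counts
-- ===== Notes on version B (the rewrite author's own statement) =====
-- stated objective: alternative
-- what changed: B iterates over the classes, counting and then removing the matching numbers from a shrinking pool of still-unclassified numbers (two filters per class), instead of A's per-number scan of the classes with a break into a count array.
-- outside the precondition, e.g. on classify([], [(0,)]): A returns [0], B raises IndexError; on classify([5], [(0, 10), (99,)]): A returns [1, 0], B raises IndexError
import Mathlib
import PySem

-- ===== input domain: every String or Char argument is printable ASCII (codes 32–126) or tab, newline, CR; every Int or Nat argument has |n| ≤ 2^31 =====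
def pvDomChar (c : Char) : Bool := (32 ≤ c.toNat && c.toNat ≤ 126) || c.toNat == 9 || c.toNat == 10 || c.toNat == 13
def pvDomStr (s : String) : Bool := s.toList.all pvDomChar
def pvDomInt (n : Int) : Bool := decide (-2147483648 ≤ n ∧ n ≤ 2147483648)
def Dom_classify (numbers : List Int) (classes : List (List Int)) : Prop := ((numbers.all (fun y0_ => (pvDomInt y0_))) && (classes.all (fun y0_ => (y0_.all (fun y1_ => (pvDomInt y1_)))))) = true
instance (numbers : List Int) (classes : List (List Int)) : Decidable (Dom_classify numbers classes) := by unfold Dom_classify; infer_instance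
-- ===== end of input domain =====

-- B builds the result class by class, counting and removing the matching numbers from a
-- shrinking pool of still-unclassified numbers; A scans the classes once per number with a
-- break into a count array. Same asymptotic cost; equivalence is proved on classes whose
-- members all have at least two elements (Pre_), where neither Python raises.

-- ===== PORT A =====
-- inner 'for index, c in enumerate(classes): if n >= c[0] and n < c[1]: count[index] += 1; break'
-- (c[0]/c[1] via pyGet?; none = IndexError, unreachable under Pre_, the loop then just stops)
def pvAInner (n : Int) : List (List Int) → List Int → Nat → List Int
  | [], count, _ => count
  | c :: rest, count, i =>
    match PySem.List.pyGet? c 0 with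
    | none => count
    | some lo =>
      if lo ≤ n then
        match PySem.List.pyGet? c 1 with
        | none => count
        | some hi =>
          if n < hi then count.set i (count.getD i 0 + 1)
          else pvAInner n rest count (i + 1)
      else pvAInner n rest count (i + 1)

def classify (numbers : List Int) (classes : List (List Int)) : List Int :=
  numbers.foldl (fun count n => pvAInner n classes count 0) (List.replicate classes.length 0)

-- ===== PORT B =====
-- 'for c in classes: lo, hi = c[0], c[1]; matched = [...]; counts.append(len(matched));
--  remaining = [n for n in remaining if not (lo <= n < hi)]'
-- (pyGet? none = IndexError on a short class, unreachable under Pre_: the output just stops there)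
def pvBGo : List (List Int) → List Int → List Int
  | [], _ => []
  | c :: rest, remaining =>
    match PySem.List.pyGet? c 0, PySem.List.pyGet? c 1 with
    | some lo, some hi =>
      ((remaining.filter fun n => decide (lo ≤ n) && decide (n < hi)).length : Int)
        :: pvBGo rest (remaining.filter fun n => !(decide (lo ≤ n) && decide (n < hi)))
    | _, _ => []

def classify_alt (numbers : List Int) (classes : List (List Int)) : List Int :=
  pvBGo classes numbers

-- ===== PRECONDITION & SPEC =====
-- Pre_ excludes classes containing a member with fewer than two boundaries: B raises
-- IndexError on every such input, and A raises too whenever a number reaches that member.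
def Pre_classify (numbers : List Int) (classes : List (List Int)) : Prop :=
  ∀ c ∈ classes, 2 ≤ c.length
instance (numbers : List Int) (classes : List (List Int)) : Decidable (Pre_classify numbers classes) := by
  unfold Pre_classify; infer_instance

def pvWitness_classify : List Int × List (List Int) := ([1, 2, 3, 2, 7], [[0, 2], [2, 4]])

def Spec_classify (numbers : List Int) (classes : List (List Int)) (out : List Int) : Prop := out = classify_alt numbers classes
instance (numbers : List Int) (classes : List (List Int)) (out : List Int) : Decidable (Spec_classify numbers classes out) := by unfold Spec_classify; infer_instance

-- ===== CLAIM (what is proved, stated in full; the proofs are below) =====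
def Claim_equal_classify : Prop := ∀ (numbers : List Int) (classes : List (List Int)), Dom_classify numbers classes → Pre_classify numbers classes → Spec_classify numbers classes (classify numbers classes)

-- ===== LEMMAS AND PROOFS =====

-- the matching predicate, the first-match index, and the "add f at index o" step
def pvPred (n : Int) (c : List Int) : Bool := decide (c.getD 0 0 ≤ n) && decide (n < c.getD 1 0)

def pvBump (count : List Int) (o : Option Nat) (f : Int) : List Int :=
  match o with
  | none => count
  | some j => count.set j (count.getD j 0 + f)

theorem pvPyGet_of_len {c : List Int} (h : 2 ≤ c.length) :
    PySem.List.pyGet? c 0 = some (c.getD 0 0) ∧ PySem.List.pyGet? c 1 = some (c.getD 1 0) := by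
  match c, h with
  | a :: b :: t, _ =>
    refine ⟨?_, ?_⟩
    · rw [show (0:Int) = ((0:Nat):Int) from rfl, PySem.List.pyGet?_natCast]; rfl
    · rw [show (1:Int) = ((1:Nat):Int) from rfl, PySem.List.pyGet?_natCast]; rfl

theorem pvAInner_eq (n : Int) (cs : List (List Int)) (h : ∀ c ∈ cs, 2 ≤ c.length) :
    ∀ (count : List Int) (i : Nat),
      pvAInner n cs count i = pvBump count ((cs.findIdx? (pvPred n)).map (· + i)) 1 := by
  induction cs with
  | nil => intro count i; simp [pvAInner, pvBump]
  | cons c rest ih =>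
    intro count i
    obtain ⟨h0, h1⟩ := pvPyGet_of_len (h c (by simp))
    have hrest : ∀ c ∈ rest, 2 ≤ c.length := fun c hc => h c (by simp [hc])
    rw [List.findIdx?_cons]
    by_cases hp : pvPred n c = true
    · have ⟨hlo, hhi⟩ : c.getD 0 0 ≤ n ∧ n < c.getD 1 0 := by
        simpa [pvPred] using hp
      simp only [List.getD_eq_getElem?_getD] at hlo hhi
      simp [pvAInner, h0, h1, hlo, hhi, hp, pvBump]
    · have hcase : ¬ (c.getD 0 0 ≤ n) ∨ ¬ (n < c.getD 1 0) := by
        by_contra hcon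
        push_neg at hcon
        obtain ⟨hc1, hc2⟩ := hcon
        simp only [List.getD_eq_getElem?_getD] at hc1 hc2
        exact hp (by simp [pvPred, hc1, hc2])
      have hstep : pvAInner n (c :: rest) count i = pvAInner n rest count (i + 1) := by
        rcases hcase with hlo | hhi
        · simp only [List.getD_eq_getElem?_getD] at hlo
          simp [pvAInner, h0, hlo]
        · by_cases hlo : c.getD 0 0 ≤ n
          · simp only [List.getD_eq_getElem?_getD] at hlo hhi
            simp [pvAInner, h0, h1, hlo, hhi]
          · simp only [List.getD_eq_getElem?_getD] at hlo
            simp [pvAInner, h0, hlo]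
      rw [hstep, ih hrest count (i + 1)]
      simp [hp, Option.map_map, Function.comp_def, Nat.add_assoc, Nat.add_comm 1 i]

theorem pvBump_getElem? (cl : List Int) (o : Option Nat) (f : Int) (j : Nat) :
    (pvBump cl o f)[j]? = if o = some j then cl[j]?.map (· + f) else cl[j]? := by
  cases o with
  | none => simp [pvBump]
  | some k =>
    by_cases hk : k = j
    · subst hk
      by_cases hlen : k < cl.length
      · simp [pvBump, hlen, List.getElem?_eq_getElem hlen]
      · have h1 : cl[k]? = none := List.getElem?_eq_none (by omega)
        have h2 : (cl.set k (cl.getD k 0 + f))[k]? = none :=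
          List.getElem?_eq_none (by simp; omega)
        simp [pvBump, h1, h2]
        omega
    · simp [pvBump, hk]

-- the pointwise value of A's fold of bumps
theorem pvFoldlBump_getElem? (oidx : Int → Option Nat) (nums : List Int)
    (init : List Int) (j : Nat) :
    (nums.foldl (fun acc n => pvBump acc (oidx n) 1) init)[j]? =
      init[j]?.map (· + (nums.countP (fun n => oidx n == some j) : Int)) := by
  induction nums generalizing init with
  | nil => simp
  | cons n rest ih =>
    rw [List.foldl_cons, ih, pvBump_getElem?, List.countP_cons]
    by_cases hm : oidx n = some j
    · simp only [hm, if_pos rfl, beq_iff_eq, if_pos rfl, Option.map_map]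
      cases init[j]? <;> simp [Function.comp, add_assoc, add_comm (1 : Int)]
    · simp [hm]

-- the first-match index of n among the classes, as A's inner loop computes it (shifted by 0)
def pvOidx (classes : List (List Int)) (n : Int) : Option Nat :=
  (classes.findIdx? (pvPred n)).map (· + 0)

theorem classify_eq_fold (numbers : List Int) (classes : List (List Int))
    (h : ∀ c ∈ classes, 2 ≤ c.length) :
    classify numbers classes =
      numbers.foldl (fun acc n => pvBump acc (pvOidx classes n) 1)
        (List.replicate classes.length 0) := by
  unfold classify
  exact PySem.List.foldl_congr_mem _ _ _ _
    (fun acc n _ => pvAInner_eq n classes h acc 0)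

-- B's pool recursion computes, for each class index, the count of numbers whose FIRST
-- matching class is that one
theorem pvBGo_eq (cs : List (List Int)) (h : ∀ c ∈ cs, 2 ≤ c.length) :
    ∀ (rem : List Int),
      pvBGo cs rem = (List.range cs.length).map
        (fun j => (rem.countP (fun n => cs.findIdx? (pvPred n) == some j) : Int)) := by
  induction cs with
  | nil => intro rem; simp [pvBGo]
  | cons c rest ih =>
    intro rem
    obtain ⟨h0, h1⟩ := pvPyGet_of_len (h c (by simp))
    have hrest : ∀ c ∈ rest, 2 ≤ c.length := fun c hc => h c (by simp [hc])
    have hpred : (fun n => decide (c.getD 0 0 ≤ n) && decide (n < c.getD 1 0)) = fun n => pvPred n c := by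
      funext n; rfl
    have hunfold : pvBGo (c :: rest) rem =
        ((rem.filter fun n => pvPred n c).length : Int)
          :: pvBGo rest (rem.filter fun n => !(pvPred n c)) := by
      simp only [pvBGo, h0, h1]
      rfl
    rw [hunfold, ih hrest, List.length_cons, List.range_succ_eq_map, List.map_cons, List.map_map]
    congr 1
    · -- head: first-match index 0 iff the head class matches
      rw [← List.countP_eq_length_filter]
      refine congrArg _ (List.countP_congr fun n _ => ?_).symm
      rw [List.findIdx?_cons]
      by_cases hp : pvPred n c = true
      · simp [hp]
      · simp only [hp, if_false]
        cases rest.findIdx? (pvPred n) <;> simp [hp]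
    · -- tail: index j+1 iff the head does not match and the rest's first match is j
      refine List.map_congr_left fun j _ => ?_
      rw [Function.comp_apply, List.countP_filter]
      refine congrArg _ (List.countP_congr fun n _ => ?_)
      rw [List.findIdx?_cons]
      by_cases hp : pvPred n c = true
      · simp [hp]
      · simp only [hp, if_false]
        cases rest.findIdx? (pvPred n) with
        | none => simp [hp]
        | some k => simp [hp, Nat.succ_eq_add_one]

-- ===== VERDICT (by name: the statement is the Claim_ definition above) =====
theorem classify_spec : Claim_equal_classify := by
  intro numbers classes _ hpre
  unfold Spec_classify classify_alt
  rw [classify_eq_fold numbers classes hpre, pvBGo_eq classes hpre numbers]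
  apply List.ext_getElem?
  intro j
  rw [pvFoldlBump_getElem?]
  by_cases hj : j < classes.length
  · rw [List.getElem?_eq_getElem (by simpa using hj),
        List.getElem?_eq_getElem (by simpa using hj)]
    simp [pvOidx, List.getElem_replicate]
  · rw [List.getElem?_eq_none (by simpa using hj),
        List.getElem?_eq_none (by simpa using not_lt.mp hj)]
    rfl
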